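-- pv_equiv track=rewrite | github.com/ikokkari/PythonProblems | labs109.py | cousin_explainer
-- ===== SOURCE A (Python) =====
-- __ordinals = ['zeroth', 'first', 'second', 'third', 'fourth', 'fifth', 'sixth', 'seventh', 'eighth', 'ninth', 'tenth']
--
-- __removals = ['none', 'once', 'twice', 'thrice', 'four times', 'five times', 'six times', 'seven times',
--               'eight times', 'nine times', 'ten times']
--
-- def cousin_explainer(a, b):
--     sa, sb = 0, 0
--     # Climb up on step from larger number until both numbers are equal
--     while a != b:
--         if a > b:
--             sa, a = sa + 1, a // 2
--         else:
--             sb, b = sb + 1, b // 2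
--     if sb == 0:  # Parental line
--         return 'mother' if sa == 1 else ('great ' * (sa - 2)) + 'grandmother'
--     elif sa == 0:  # Descendant line
--         return 'daughter' if sb == 1 else ('great ' * (sb - 2)) + 'granddaughter'
--     elif sa == 1:  # Sisterly line
--         if sb == 1:
--             return 'sister'
--         else:
--             return 'niece' if sb == 2 else ('great ' * (sb - 2)) + 'grandniece'
--     elif sb == 1:  # Aunty line
--         if sa == 2:
--             return 'aunt'
--         elif sa == 3:
--             return 'great aunt'
--         else:
--             return ('great ' * (sa - 3)) + 'grandaunt'
--     else:  # Cousinly line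
--         cousin_degree = __ordinals[min(sa, sb) - 1]
--         cousin_removal = __removals[abs(sa - sb)]
--         return f'{cousin_degree} cousin' if sa == sb else f'{cousin_degree} cousin {cousin_removal} removed'
-- ===== SOURCE B (Python) =====
-- __ordinals = ['zeroth', 'first', 'second', 'third', 'fourth', 'fifth', 'sixth', 'seventh', 'eighth', 'ninth', 'tenth']
--
-- __removals = ['none', 'once', 'twice', 'thrice', 'four times', 'five times', 'six times', 'seven times',
--               'eight times', 'nine times', 'ten times']
--
-- def _kinship(sa, sb):
--     if sb == 0:  # Parental line
--         return 'mother' if sa == 1 else ('great ' * (sa - 2)) + 'grandmother'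
--     elif sa == 0:  # Descendant line
--         return 'daughter' if sb == 1 else ('great ' * (sb - 2)) + 'granddaughter'
--     elif sa == 1:  # Sisterly line
--         if sb == 1:
--             return 'sister'
--         else:
--             return 'niece' if sb == 2 else ('great ' * (sb - 2)) + 'grandniece'
--     elif sb == 1:  # Aunty line
--         if sa == 2:
--             return 'aunt'
--         elif sa == 3:
--             return 'great aunt'
--         else:
--             return ('great ' * (sa - 3)) + 'grandaunt'
--     else:  # Cousinly line
--         cousin_degree = __ordinals[min(sa, sb) - 1]
--         cousin_removal = __removals[abs(sa - sb)]
--         return f'{cousin_degree} cousin' if sa == sb else f'{cousin_degree} cousin {cousin_removal} removed'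
--
-- def cousin_explainer(a, b):
--     # Depth-guided climb: bring the deeper node up to the shallower depth,
--     # then climb both in lockstep until they meet; name the kinship from the counts.
--     sa, sb = 0, 0
--     da, db = a.bit_length(), b.bit_length()
--     while da > db:
--         a, da, sa = a // 2, da - 1, sa + 1
--     while db > da:
--         b, db, sb = b // 2, db - 1, sb + 1
--     while a != b:
--         a, b, sa, sb = a // 2, b // 2, sa + 1, sb + 1
--     return _kinship(sa, sb)
-- ===== Notes on version B (the rewrite author's own statement) =====
-- stated objective: alternative
-- what changed: Replaces the comparison-driven one-at-a-time climb (halving whichever number is currently larger) by a depth-guided two-phase climb: bit_length gives each node's depth, the deeper node is raised alone to the shallower depth, then both are halved in lockstep until they meet; the same step counts feed the same kinship cascade.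
import Mathlib
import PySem

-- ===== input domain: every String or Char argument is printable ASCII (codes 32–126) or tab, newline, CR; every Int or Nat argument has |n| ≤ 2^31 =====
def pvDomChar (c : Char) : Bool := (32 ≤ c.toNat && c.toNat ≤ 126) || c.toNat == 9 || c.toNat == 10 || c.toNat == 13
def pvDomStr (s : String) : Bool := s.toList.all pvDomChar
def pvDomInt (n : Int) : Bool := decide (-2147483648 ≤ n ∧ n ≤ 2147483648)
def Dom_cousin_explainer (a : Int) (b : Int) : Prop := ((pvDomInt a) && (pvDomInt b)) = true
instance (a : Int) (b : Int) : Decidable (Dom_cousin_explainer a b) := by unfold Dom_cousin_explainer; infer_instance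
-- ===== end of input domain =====

-- B replaces A's comparison-driven one-at-a-time climb by a bit_length-guided two-phase climb
-- (align depths, then halve both in lockstep); same step counts feed the same kinship cascade.

-- ===== PORT A =====
def pvOrdinals : List String :=
  ["zeroth", "first", "second", "third", "fourth", "fifth", "sixth", "seventh", "eighth", "ninth", "tenth"]

def pvRemovals : List String :=
  ["none", "once", "twice", "thrice", "four times", "five times", "six times", "seven times",
   "eight times", "nine times", "ten times"]

-- 'great ' * n  (n already clamped at 0, as Nat subtraction does below, matching Python's s * k for k ≤ 0)
def pvGreat : Nat → String
  | 0 => ""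
  | n + 1 => "great " ++ pvGreat n

-- A's while-loop (climb the larger number), fuel only for totality: inside Pre_ the
-- loop does at most |a|+|b| iterations, so the fuel used in cousin_explainer never runs out.
def pvClimb : Nat → Int → Int → Nat → Nat → Nat × Nat
  | 0, _, _, sa, sb => (sa, sb)
  | f + 1, a, b, sa, sb =>
    if a = b then (sa, sb)
    else if a > b then pvClimb f (PySem.Int.floordiv a 2) b (sa + 1) sb
    else pvClimb f a (PySem.Int.floordiv b 2) sa (sb + 1)

def cousin_explainer (a : Int) (b : Int) : String :=
  match pvClimb (a.natAbs + b.natAbs + 1) a b 0 0 with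
  | (sa, sb) =>
    if sb = 0 then
      if sa = 1 then "mother" else pvGreat (sa - 2) ++ "grandmother"
    else if sa = 0 then
      if sb = 1 then "daughter" else pvGreat (sb - 2) ++ "granddaughter"
    else if sa = 1 then
      if sb = 1 then "sister"
      else if sb = 2 then "niece" else pvGreat (sb - 2) ++ "grandniece"
    else if sb = 1 then
      if sa = 2 then "aunt"
      else if sa = 3 then "great aunt"
      else pvGreat (sa - 3) ++ "grandaunt"
    else
      let cousin_degree := PySem.List.pyGetD pvOrdinals ((min sa sb : Int) - 1) ""
      let cousin_removal := PySem.List.pyGetD pvRemovals (((sa : Int) - (sb : Int)).natAbs : Int) ""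
      if sa = sb then cousin_degree ++ " cousin"
      else cousin_degree ++ " cousin " ++ cousin_removal ++ " removed"

-- ===== PORT B =====
-- the _kinship helper of Source B (same cascade over the step counts)
def pvKinship (sa : Nat) (sb : Nat) : String :=
  if sb = 0 then
    if sa = 1 then "mother" else pvGreat (sa - 2) ++ "grandmother"
  else if sa = 0 then
    if sb = 1 then "daughter" else pvGreat (sb - 2) ++ "granddaughter"
  else if sa = 1 then
    if sb = 1 then "sister"
    else if sb = 2 then "niece" else pvGreat (sb - 2) ++ "grandniece"
  else if sb = 1 then
    if sa = 2 then "aunt"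
    else if sa = 3 then "great aunt"
    else pvGreat (sa - 3) ++ "grandaunt"
  else
    let cousin_degree := PySem.List.pyGetD pvOrdinals ((min sa sb : Int) - 1) ""
    let cousin_removal := PySem.List.pyGetD pvRemovals (((sa : Int) - (sb : Int)).natAbs : Int) ""
    if sa = sb then cousin_degree ++ " cousin"
    else cousin_degree ++ " cousin " ++ cousin_removal ++ " removed"

-- Source B's depth-alignment loop: halve x once per iteration, k = (own depth - other depth) iterations
def pvLower : Int → Nat → Int × Nat
  | x, 0 => (x, 0)
  | x, k + 1 =>
    match pvLower (PySem.Int.floordiv x 2) k with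
    | (y, s) => (y, s + 1)

-- Source B's lockstep loop (halve both until equal); fuel only for totality, as in pvClimb
def pvLock : Nat → Int → Int → Nat
  | 0, _, _ => 0
  | f + 1, a, b =>
    if a = b then 0 else pvLock f (PySem.Int.floordiv a 2) (PySem.Int.floordiv b 2) + 1

def pvSteps (a : Int) (b : Int) : Nat × Nat :=
  match pvLower a (PySem.Int.bitLength a - PySem.Int.bitLength b),
        pvLower b (PySem.Int.bitLength b - PySem.Int.bitLength a) with
  | (a1, sa), (b1, sb) =>
    (sa + pvLock (a1.natAbs + b1.natAbs + 1) a1 b1,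
     sb + pvLock (a1.natAbs + b1.natAbs + 1) a1 b1)

def cousin_explainer_alt (a : Int) (b : Int) : String :=
  match pvSteps a b with
  | (sa, sb) => pvKinship sa sb

-- ===== PRECONDITION & SPEC =====
-- "do the ancestors of a and b at depth k (tree levels counted from the root) coincide?"
def pvAncEq (a : Int) (b : Int) (k : Nat) : Bool :=
  a.natAbs >>> (PySem.Int.bitLength a - k) == b.natAbs >>> (PySem.Int.bitLength b - k)

-- Pre_ excludes exactly the inputs where Python A does not return: a ≠ b with a negative or
-- zero-vs-negative pair (the while-loop never terminates) and the pairs whose kinship falls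
-- outside the 11-entry tables — cousins of degree ≥ 12 (common ancestor deeper than 11 above
-- the shallower node) or cousins removed ≥ 11 (depths differing by > 10) — where A raises IndexError.
def Pre_cousin_explainer (a : Int) (b : Int) : Prop :=
  a = b ∨ (0 ≤ a ∧ 0 ≤ b ∧
    pvAncEq a b (min (PySem.Int.bitLength a) (PySem.Int.bitLength b) - 11) = true ∧
    ((PySem.Int.bitLength a - PySem.Int.bitLength b ≤ 10 ∧
      PySem.Int.bitLength b - PySem.Int.bitLength a ≤ 10) ∨
     pvAncEq a b (min (PySem.Int.bitLength a) (PySem.Int.bitLength b) - 1) = true))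

instance (a : Int) (b : Int) : Decidable (Pre_cousin_explainer a b) := by
  unfold Pre_cousin_explainer; infer_instance

def pvWitness_cousin_explainer : Int × Int := (6, 7)

def Spec_cousin_explainer (a : Int) (b : Int) (out : String) : Prop := out = cousin_explainer_alt a b
instance (a : Int) (b : Int) (out : String) : Decidable (Spec_cousin_explainer a b out) := by unfold Spec_cousin_explainer; infer_instance

-- ===== CLAIM (what is proved, stated in full; the proofs are below) =====
def Claim_equal_cousin_explainer : Prop := ∀ (a : Int) (b : Int), Dom_cousin_explainer a b → Pre_cousin_explainer a b → Spec_cousin_explainer a b (cousin_explainer a b)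

-- ===== LEMMAS AND PROOFS =====

lemma pvH2_natCast (m : Nat) : PySem.Int.floordiv (m : Int) 2 = ((m / 2 : Nat) : Int) := by
  exact_mod_cast PySem.Int.floordiv_natCast m 2

lemma pvBL_zero : PySem.Int.bitLength ((0 : Nat) : Int) = 0 := by decide

-- a smaller bit length means a smaller number (for nonnegative values, via casts)
lemma pvLt_of_bl_lt {m n : Nat}
    (h : PySem.Int.bitLength (m : Int) < PySem.Int.bitLength (n : Int)) : m < n := by
  have hn0 : (n : Int) ≠ 0 := by
    intro e
    have : n = 0 := by exact_mod_cast e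
    subst this
    rw [pvBL_zero] at h
    omega
  have h1 := PySem.Int.lt_two_pow_bitLength (m : Int)
  have h2 := PySem.Int.two_pow_bitLength_le (n : Int) hn0
  have h3 : (2 : Nat) ^ PySem.Int.bitLength (m : Int) ≤
      2 ^ (PySem.Int.bitLength (n : Int) - 1) :=
    Nat.pow_le_pow_right (by norm_num) (by omega)
  simp only [Int.natAbs_natCast] at h1 h2
  omega

lemma pvBL_succ {m : Nat} (hm : 0 < m) :
    PySem.Int.bitLength (m : Int) = PySem.Int.bitLength ((m / 2 : Nat) : Int) + 1 :=
  PySem.Int.bitLength_natCast hm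

lemma pvBL_pos {m : Nat} (hm : 0 < m) : 0 < PySem.Int.bitLength (m : Int) := by
  rw [pvBL_succ hm]; omega

-- pvLock does not depend on the fuel, as long as the fuel is sufficient
lemma pvLock_agnostic : ∀ (f g m n : Nat), m + n < f → m + n < g →
    pvLock f (m : Int) (n : Int) = pvLock g (m : Int) (n : Int) := by
  intro f
  induction f with
  | zero => intro g m n hf; omega
  | succ f IH =>
    intro g m n hf hg
    match g, hg with
    | g + 1, hg =>
      simp only [pvLock]
      by_cases hmn : (m : Int) = (n : Int)
      · simp [hmn]
      · have hne : m ≠ n := by exact_mod_cast hmn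
        rw [if_neg hmn, if_neg hmn, pvH2_natCast, pvH2_natCast]
        rw [IH g (m / 2) (n / 2) (by omega) (by omega)]

lemma pvSteps_self (a : Int) : pvSteps a a = (0, 0) := by
  simp [pvSteps, pvLower, pvLock]

-- B at equal depths: both alignment loops are empty, only the lockstep count remains
lemma pvSteps_eqbl {m n : Nat}
    (h : PySem.Int.bitLength (m : Int) = PySem.Int.bitLength (n : Int)) :
    pvSteps (m : Int) (n : Int) =
      (pvLock (m + n + 1) (m : Int) (n : Int), pvLock (m + n + 1) (m : Int) (n : Int)) := by
  unfold pvSteps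
  rw [h]
  simp [pvLower, Int.natAbs_natCast]

-- one step of B when a is strictly deeper than b
lemma pvSteps_left {m n : Nat}
    (h : PySem.Int.bitLength (n : Int) < PySem.Int.bitLength (m : Int)) :
    pvSteps (m : Int) (n : Int) =
      ((pvSteps ((m / 2 : Nat) : Int) (n : Int)).1 + 1, (pvSteps ((m / 2 : Nat) : Int) (n : Int)).2) := by
  have hm : 0 < m := by
    rcases Nat.eq_zero_or_pos m with h0 | h0
    · subst h0; rw [pvBL_zero] at h; omega
    · exact h0
  have hsucc := pvBL_succ hm
  unfold pvSteps
  rw [hsucc]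
  have h1 : PySem.Int.bitLength ((m / 2 : Nat) : Int) + 1 - PySem.Int.bitLength (n : Int)
      = (PySem.Int.bitLength ((m / 2 : Nat) : Int) - PySem.Int.bitLength (n : Int)) + 1 := by omega
  have h2 : PySem.Int.bitLength (n : Int) - (PySem.Int.bitLength ((m / 2 : Nat) : Int) + 1) = 0 := by omega
  have h3 : PySem.Int.bitLength (n : Int) - PySem.Int.bitLength ((m / 2 : Nat) : Int) = 0 := by omega
  rw [h1, h2, h3]
  simp only [pvLower, pvH2_natCast]
  rcases hL : pvLower ((m / 2 : Nat) : Int)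
      (PySem.Int.bitLength ((m / 2 : Nat) : Int) - PySem.Int.bitLength (n : Int)) with ⟨a1, s⟩
  simp [Nat.add_right_comm]

-- one step of B when b is strictly deeper than a
lemma pvSteps_right {m n : Nat}
    (h : PySem.Int.bitLength (m : Int) < PySem.Int.bitLength (n : Int)) :
    pvSteps (m : Int) (n : Int) =
      ((pvSteps (m : Int) ((n / 2 : Nat) : Int)).1, (pvSteps (m : Int) ((n / 2 : Nat) : Int)).2 + 1) := by
  have hn : 0 < n := by
    rcases Nat.eq_zero_or_pos n with h0 | h0
    · subst h0; rw [pvBL_zero] at h; omega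
    · exact h0
  have hsucc := pvBL_succ hn
  unfold pvSteps
  rw [hsucc]
  have h1 : PySem.Int.bitLength ((n / 2 : Nat) : Int) + 1 - PySem.Int.bitLength (m : Int)
      = (PySem.Int.bitLength ((n / 2 : Nat) : Int) - PySem.Int.bitLength (m : Int)) + 1 := by omega
  have h2 : PySem.Int.bitLength (m : Int) - (PySem.Int.bitLength ((n / 2 : Nat) : Int) + 1) = 0 := by omega
  have h3 : PySem.Int.bitLength (m : Int) - PySem.Int.bitLength ((n / 2 : Nat) : Int) = 0 := by omega
  rw [h1, h2, h3]
  simp only [pvLower, pvH2_natCast]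
  rcases hL : pvLower ((n / 2 : Nat) : Int)
      (PySem.Int.bitLength ((n / 2 : Nat) : Int) - PySem.Int.bitLength (m : Int)) with ⟨b1, s⟩
  simp [Nat.add_right_comm]

-- one lockstep step of B at equal depths
lemma pvSteps_lock {m n : Nat} (hm : 0 < m) (hn : 0 < n) (hne : m ≠ n)
    (h : PySem.Int.bitLength (m : Int) = PySem.Int.bitLength (n : Int)) :
    pvSteps (m : Int) (n : Int) =
      ((pvSteps ((m / 2 : Nat) : Int) ((n / 2 : Nat) : Int)).1 + 1,
       (pvSteps ((m / 2 : Nat) : Int) ((n / 2 : Nat) : Int)).2 + 1) := by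
  have hm2 := pvBL_succ hm
  have hn2 := pvBL_succ hn
  have h' : PySem.Int.bitLength ((m / 2 : Nat) : Int) = PySem.Int.bitLength ((n / 2 : Nat) : Int) := by
    omega
  have hmn : (m : Int) ≠ (n : Int) := by exact_mod_cast hne
  rw [pvSteps_eqbl h, pvSteps_eqbl h']
  have hstep : pvLock (m + n + 1) (m : Int) (n : Int)
      = pvLock (m + n) (PySem.Int.floordiv (m : Int) 2) (PySem.Int.floordiv (n : Int) 2) + 1 := by
    simp [pvLock, hmn]
  rw [hstep, pvH2_natCast, pvH2_natCast,
    pvLock_agnostic (m + n) (m / 2 + n / 2 + 1) (m / 2) (n / 2) (by omega) (by omega)]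

-- MAIN INVARIANT: A's climb computes exactly B's step counts (nonnegative inputs, sufficient fuel)
lemma pvKey (N : Nat) : ∀ (m n : Nat), m + n ≤ N → ∀ (f sa sb : Nat), m + n < f →
    pvClimb f (m : Int) (n : Int) sa sb
      = (sa + (pvSteps (m : Int) (n : Int)).1, sb + (pvSteps (m : Int) (n : Int)).2) := by
  induction N with
  | zero =>
    intro m n hN f sa sb hf
    have hm : m = 0 := by omega
    have hn : n = 0 := by omega
    subst hm; subst hn
    match f, hf with
    | f + 1, _ => simp [pvClimb, pvSteps_self]
  | succ N IH =>
    intro m n hN f sa sb hf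
    match f, hf with
    | f + 1, hf =>
      by_cases hmn : m = n
      · subst hmn
        simp [pvClimb, pvSteps_self]
      · have hmn' : (m : Int) ≠ (n : Int) := by exact_mod_cast hmn
        rcases Nat.lt_trichotomy m n with hlt | heq | hgt
        · -- m < n : A halves n (the larger one)
          have hnot : ¬ ((m : Int) > (n : Int)) := by exact_mod_cast Nat.not_lt.mpr (Nat.le_of_lt hlt)
          have hn1 : 0 < n := by omega
          have hstep : pvClimb (f + 1) (m : Int) (n : Int) sa sb
              = pvClimb f (m : Int) ((n / 2 : Nat) : Int) sa (sb + 1) := by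
            simp only [pvClimb]
            rw [if_neg hmn', if_neg hnot, pvH2_natCast]
          rcases Nat.lt_trichotomy (PySem.Int.bitLength (m : Int)) (PySem.Int.bitLength (n : Int))
            with hbl | hbl | hbl
          · -- n strictly deeper: one step of B's phase-2
            rw [hstep, IH m (n / 2) (by omega) f sa (sb + 1) (by omega), pvSteps_right hbl]
            simp only [Prod.mk.injEq, true_and]
            omega
          · -- equal depths: n/2 now shallower than m, so A halves m next; B's lockstep step
            have hm1 : 0 < m := by
              rcases Nat.eq_zero_or_pos m with h0 | h0
              · exfalso
                subst h0
                rw [pvBL_zero] at hbl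
                have := pvBL_pos hn1
                omega
              · exact h0
            have hbl2 : PySem.Int.bitLength ((n / 2 : Nat) : Int) < PySem.Int.bitLength (m : Int) := by
              have := pvBL_succ hn1
              omega
            have hlt2 : n / 2 < m := pvLt_of_bl_lt hbl2
            have hne2 : (m : Int) ≠ ((n / 2 : Nat) : Int) := by
              intro e
              have : m = n / 2 := by exact_mod_cast e
              omega
            have hgt2 : ((n / 2 : Nat) : Int) < (m : Int) := by exact_mod_cast hlt2
            obtain ⟨f', rfl⟩ : ∃ f', f = f' + 1 := ⟨f - 1, by omega⟩
            have hstep2 : pvClimb (f' + 1) (m : Int) ((n / 2 : Nat) : Int) sa (sb + 1)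
                = pvClimb f' ((m / 2 : Nat) : Int) ((n / 2 : Nat) : Int) (sa + 1) (sb + 1) := by
              simp only [pvClimb]
              rw [if_neg hne2, if_pos hgt2, pvH2_natCast]
            rw [hstep, hstep2, IH (m / 2) (n / 2) (by omega) f' (sa + 1) (sb + 1) (by omega),
              pvSteps_lock hm1 hn1 hmn hbl]
            simp only [Prod.mk.injEq]
            omega
          · -- m would be strictly deeper: contradicts m < n
            exact absurd (pvLt_of_bl_lt hbl) (by omega)
        · omega
        · -- m > n : A halves m (the larger one)
          have hgt' : ((n : Nat) : Int) < (m : Int) := by exact_mod_cast hgt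
          have hm1 : 0 < m := by omega
          have hstep : pvClimb (f + 1) (m : Int) (n : Int) sa sb
              = pvClimb f ((m / 2 : Nat) : Int) (n : Int) (sa + 1) sb := by
            simp only [pvClimb]
            rw [if_neg hmn', if_pos hgt', pvH2_natCast]
          rcases Nat.lt_trichotomy (PySem.Int.bitLength (n : Int)) (PySem.Int.bitLength (m : Int))
            with hbl | hbl | hbl
          · -- m strictly deeper: one step of B's phase-1
            rw [hstep, IH (m / 2) n (by omega) f (sa + 1) sb (by omega), pvSteps_left hbl]
            simp only [Prod.mk.injEq, and_true]
            omega
          · -- equal depths: m/2 now shallower than n, so A halves n next; B's lockstep step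
            have hn1 : 0 < n := by
              rcases Nat.eq_zero_or_pos n with h0 | h0
              · exfalso
                subst h0
                rw [pvBL_zero] at hbl
                have := pvBL_pos hm1
                omega
              · exact h0
            have hbl2 : PySem.Int.bitLength ((m / 2 : Nat) : Int) < PySem.Int.bitLength (n : Int) := by
              have := pvBL_succ hm1
              omega
            have hlt2 : m / 2 < n := pvLt_of_bl_lt hbl2
            have hne2 : ((m / 2 : Nat) : Int) ≠ (n : Int) := by
              intro e
              have : m / 2 = n := by exact_mod_cast e
              omega
            have hnot2 : ¬ (((m / 2 : Nat) : Int) > (n : Int)) := by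
              exact_mod_cast Nat.not_lt.mpr (Nat.le_of_lt hlt2)
            obtain ⟨f', rfl⟩ : ∃ f', f = f' + 1 := ⟨f - 1, by omega⟩
            have hstep2 : pvClimb (f' + 1) ((m / 2 : Nat) : Int) (n : Int) (sa + 1) sb
                = pvClimb f' ((m / 2 : Nat) : Int) ((n / 2 : Nat) : Int) (sa + 1) (sb + 1) := by
              simp only [pvClimb]
              rw [if_neg hne2, if_neg hnot2, pvH2_natCast]
            rw [hstep, hstep2, IH (m / 2) (n / 2) (by omega) f' (sa + 1) (sb + 1) (by omega),
              pvSteps_lock hm1 hn1 hmn (hbl.symm)]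
            simp only [Prod.mk.injEq]
            omega
          · exact absurd (pvLt_of_bl_lt hbl) (by omega)

lemma pvEq_self (a : Int) : cousin_explainer a a = cousin_explainer_alt a a := by
  unfold cousin_explainer cousin_explainer_alt
  rw [pvSteps_self]
  simp [pvClimb]
  rfl

lemma pvEq_nonneg (m n : Nat) :
    cousin_explainer (m : Int) (n : Int) = cousin_explainer_alt (m : Int) (n : Int) := by
  unfold cousin_explainer cousin_explainer_alt
  have hfuel : ((m : Int).natAbs + (n : Int).natAbs + 1) = m + n + 1 := by
    simp [Int.natAbs_natCast]
  rw [hfuel, pvKey (m + n) m n le_rfl (m + n + 1) 0 0 (by omega)]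
  rcases hp : pvSteps (m : Int) (n : Int) with ⟨sa, sb⟩
  simp [pvKinship]

-- ===== VERDICT (by name: the statement is the Claim_ definition above) =====
theorem cousin_explainer_spec : Claim_equal_cousin_explainer := by
  intro a b _ hpre
  unfold Spec_cousin_explainer
  rcases hpre with hab | ⟨ha, hb, -, -⟩
  · subst hab; exact pvEq_self a
  · lift a to ℕ using ha
    lift b to ℕ using hb
    exact pvEq_nonneg a b
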